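-- pv_equiv track=rewrite | github.com/aaa2ppp/ya-coderun-2024 | p453+/main.py | devide_by_comps
-- ===== SOURCE A (Python) =====
-- def devide_by_comps(graph):
--     visited = [False]*len(graph)
--
--     def dfs(node):
--         if visited[node]:
--             return 0
--         visited[node] = True
--         size = 1
--         for neig in graph[node]:
--             size += dfs(neig)
--         return size
--
--     comps = []
--     for node in range(len(graph)):
--         if not visited[node]:
--             size = dfs(node)
--             if size >= 3:
--                 comps.append((node, size))
--
--     return comps
-- ===== SOURCE B (Python) =====
-- def devide_by_comps(graph):
--     visited = [False] * len(graph)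
--     comps = []
--     for node in range(len(graph)):
--         if visited[node]:
--             continue
--         size = 0
--         stack = [node]
--         while stack:
--             cur = stack.pop()
--             if visited[cur]:
--                 continue
--             visited[cur] = True
--             size += 1
--             stack.extend(reversed(graph[cur]))
--         if size >= 3:
--             comps.append((node, size))
--     return comps
-- ===== Notes on version B (the rewrite author's own statement) =====
-- stated objective: alternative
-- what changed: The recursive nested dfs helper is replaced by an iterative DFS with an explicit stack (pop a node, skip if visited, mark, count, push its neighbors in reverse), removing the recursive helper and Python's recursion-depth limit.
import Mathlib
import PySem

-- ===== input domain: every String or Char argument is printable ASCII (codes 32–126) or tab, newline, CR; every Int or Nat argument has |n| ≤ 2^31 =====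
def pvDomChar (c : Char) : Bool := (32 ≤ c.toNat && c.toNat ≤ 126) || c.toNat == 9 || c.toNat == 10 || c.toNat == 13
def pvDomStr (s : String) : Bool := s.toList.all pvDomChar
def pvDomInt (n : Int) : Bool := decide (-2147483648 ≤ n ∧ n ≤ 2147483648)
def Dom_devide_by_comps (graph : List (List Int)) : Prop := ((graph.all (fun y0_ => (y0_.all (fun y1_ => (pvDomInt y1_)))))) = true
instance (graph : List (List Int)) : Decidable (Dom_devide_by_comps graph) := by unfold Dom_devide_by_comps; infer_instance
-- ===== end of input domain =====

-- B replaces the recursive dfs helper of A by an iterative explicit-stack DFS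
-- (pop, skip if visited, mark+count, push neighbors in reverse); same outer loop,
-- same output; cost is the same O(V+E), but B avoids Python's recursion-depth limit.


-- ===== PORT A =====
-- A's nested `dfs`: visited is threaded as explicit state; the recursion is made
-- structural by a fuel argument (one unit per nesting level; `graph.length` fuel is
-- always enough because every nesting level marks a fresh node — see the proofs).
def dfsA (graph : List (List Int)) : Nat → Int → List Bool → List Bool × Int
  | 0, _, v => (v, 0)                     -- fuel guard, never reached from the top-level call
  | Nat.succ f, node, v =>
    match PySem.List.pyGet? v node with   -- `if visited[node]: return 0` (none = IndexError, outside Pre_)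
    | some true => (v, 0)
    | none => (v, 0)
    | some false =>
      let v1 := PySem.List.pySetD v node true                 -- `visited[node] = True`
      (PySem.List.pyGetD graph node []).foldl                 -- `for neig in graph[node]: size += dfs(neig)`
        (fun st neig => let q := dfsA graph f neig st.1; (q.1, st.2 + q.2)) (v1, 1)

def devide_by_comps (graph : List (List Int)) : List (Int × Int) :=
  ((PySem.List.pyRange 0 graph.length 1).foldl
    (fun (st : List Bool × List (Int × Int)) node =>
      match PySem.List.pyGet? st.1 node with                  -- `if not visited[node]:`
      | some false =>
        let p := dfsA graph graph.length node st.1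
        (p.1, if 3 ≤ p.2 then st.2 ++ [(node, p.2)] else st.2)
      | _ => st)
    (List.replicate graph.length false, [])).2

-- ===== PORT B =====
-- needed by stackLoopB's termination proof (cited there by name)
theorem pyGet?_some_elim {α : Type} {v : List α} {i : Int} {x : α}
    (h : PySem.List.pyGet? v i = some x) :
    ∃ j : Nat, v[j]? = some x ∧ ∀ y : α, PySem.List.pySetD v i y = v.set j y := by
  unfold PySem.List.pyGet? at h
  cases hj : PySem.List.pyIdx? v.length i with
  | none => simp [hj] at h
  | some j =>
    refine ⟨j, by simpa [hj] using h, fun y => ?_⟩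
    simp [PySem.List.pySetD, PySem.List.pySet?, hj]

theorem count_false_mark_lt {v : List Bool} {i : Int}
    (h : PySem.List.pyGet? v i = some false) :
    (PySem.List.pySetD v i true).count false < v.count false := by
  obtain ⟨j, hj, hset⟩ := pyGet?_some_elim h
  obtain ⟨hlt, hv⟩ := List.getElem?_eq_some_iff.mp hj
  have hmem : false ∈ v := hv ▸ List.getElem_mem hlt
  have hpos : 0 < v.count false := List.count_pos_iff.mpr hmem
  rw [hset true, List.count_set hlt, hv]
  simp; omega

-- Python B's stack pops from the end and pushes reversed(graph[cur]); the Lean list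
-- `stack` is that Python list reversed, so the top is the head and the push is `++`.
def stackLoopB (graph : List (List Int)) (v : List Bool) (stack : List Int) (size : Int) :
    List Bool × Int :=
  match stack with
  | [] => (v, size)
  | cur :: rest =>
    match hc : PySem.List.pyGet? v cur with  -- `if visited[cur]: continue` (none = IndexError, outside Pre_)
    | some true => stackLoopB graph v rest size
    | none => stackLoopB graph v rest size
    | some false =>
      stackLoopB graph (PySem.List.pySetD v cur true)
        (PySem.List.pyGetD graph cur [] ++ rest) (size + 1)
  termination_by (v.count false, stack.length)
  decreasing_by
  · exact Prod.Lex.right _ (by simp)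
  · exact Prod.Lex.right _ (by simp)
  · exact Prod.Lex.left _ _ (count_false_mark_lt hc)

def devide_by_comps_alt (graph : List (List Int)) : List (Int × Int) :=
  ((PySem.List.pyRange 0 graph.length 1).foldl
    (fun (st : List Bool × List (Int × Int)) node =>
      if PySem.List.pyGet? st.1 node == some true then st     -- `if visited[node]: continue`
      else
        let p := stackLoopB graph st.1 [node] 0
        (p.1, if 3 ≤ p.2 then st.2 ++ [(node, p.2)] else st.2))
    (List.replicate graph.length false, [])).2

-- ===== PRECONDITION & SPEC =====
-- Pre_ excludes exactly the inputs where Python raises IndexError: every node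
-- 0..len-1 is eventually visited, so every adjacency entry is used as an index
-- into `visited`; A returns normally iff all entries lie in [-len, len).
def Pre_devide_by_comps (graph : List (List Int)) : Prop :=
  ∀ l ∈ graph, ∀ n ∈ l, -(graph.length : Int) ≤ n ∧ n < graph.length
instance (graph : List (List Int)) : Decidable (Pre_devide_by_comps graph) := by
  unfold Pre_devide_by_comps; infer_instance

def pvWitness_devide_by_comps : List (List Int) := [[1, 2], [0], [1, -1]]

def Spec_devide_by_comps (graph : List (List Int)) (out : List (Int × Int)) : Prop :=
  out = devide_by_comps_alt graph
instance (graph : List (List Int)) (out : List (Int × Int)) : Decidable (Spec_devide_by_comps graph out) := by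
  unfold Spec_devide_by_comps; infer_instance

-- ===== CLAIM (what is proved, stated in full; the proofs are below) =====
def Claim_equal_devide_by_comps : Prop := ∀ (graph : List (List Int)), Dom_devide_by_comps graph → Pre_devide_by_comps graph → Spec_devide_by_comps graph (devide_by_comps graph)

-- ===== LEMMAS AND PROOFS =====

-- the neighbour fold of A's dfs, as a standalone function for the proofs
def dfsFold (graph : List (List Int)) (f : Nat) (ns : List Int) (st : List Bool × Int) :
    List Bool × Int :=
  ns.foldl (fun st neig => let q := dfsA graph f neig st.1; (q.1, st.2 + q.2)) st

theorem dfsA_succ (g : List (List Int)) (f : Nat) (node : Int) (v : List Bool) :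
    dfsA g (f + 1) node v =
      match PySem.List.pyGet? v node with
      | some false => dfsFold g f (PySem.List.pyGetD g node []) (PySem.List.pySetD v node true, 1)
      | _ => (v, 0) := by
  cases h : PySem.List.pyGet? v node with
  | none => simp [dfsA, h]
  | some b => cases b <;> simp [dfsA, dfsFold, h]

theorem stackLoopB_nil (g : List (List Int)) (v : List Bool) (size : Int) :
    stackLoopB g v [] size = (v, size) := by
  rw [stackLoopB]

theorem stackLoopB_cons (g : List (List Int)) (v : List Bool) (cur : Int) (rest : List Int)
    (size : Int) :
    stackLoopB g v (cur :: rest) size =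
      match PySem.List.pyGet? v cur with
      | some false => stackLoopB g (PySem.List.pySetD v cur true)
          (PySem.List.pyGetD g cur [] ++ rest) (size + 1)
      | _ => stackLoopB g v rest size := by
  rw [stackLoopB]
  cases h : PySem.List.pyGet? v cur with
  | none => simp
  | some b => cases b <;> simp

theorem mark_inv {v : List Bool} {i : Int} (h : PySem.List.pyGet? v i = some false) :
    (PySem.List.pySetD v i true).length = v.length ∧
      (PySem.List.pySetD v i true).count false + 1 = v.count false := by
  obtain ⟨j, hj, hset⟩ := pyGet?_some_elim h
  obtain ⟨hlt, hv⟩ := List.getElem?_eq_some_iff.mp hj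
  have hmem : false ∈ v := hv ▸ List.getElem_mem hlt
  have hpos : 0 < v.count false := List.count_pos_iff.mpr hmem
  rw [hset true, List.length_set, List.count_set hlt, hv]
  simp; omega

theorem fold_inv (g : List (List Int)) (f : Nat)
    (ih : ∀ n v, (dfsA g f n v).1.length = v.length ∧
      (dfsA g f n v).1.count false ≤ v.count false) :
    ∀ (ns : List Int) (st : List Bool × Int),
      (dfsFold g f ns st).1.length = st.1.length ∧
        (dfsFold g f ns st).1.count false ≤ st.1.count false := by
  intro ns
  induction ns with
  | nil => intro st; simp [dfsFold]
  | cons n ns ihn =>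
    intro st
    have h1 := ih n st.1
    have h2 := ihn ((dfsA g f n st.1).1, st.2 + (dfsA g f n st.1).2)
    simp only [dfsFold, List.foldl_cons] at h2 ⊢
    exact ⟨h2.1.trans h1.1, h2.2.trans h1.2⟩

theorem dfsA_inv (g : List (List Int)) :
    ∀ (f : Nat) (n : Int) (v : List Bool),
      (dfsA g f n v).1.length = v.length ∧ (dfsA g f n v).1.count false ≤ v.count false := by
  intro f
  induction f with
  | zero => intro n v; simp [dfsA]
  | succ f ih =>
    intro n v
    rw [dfsA_succ]
    cases h : PySem.List.pyGet? v n with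
    | none => simp
    | some b =>
      cases b
      · obtain ⟨hl, hc⟩ := mark_inv h
        have hf := fold_inv g f ih (PySem.List.pyGetD g n []) (PySem.List.pySetD v n true, 1)
        simp only at hf
        exact ⟨hf.1.trans hl, hf.2.trans (by omega)⟩
      · simp

theorem dfsFold_shift (g : List (List Int)) (f : Nat) :
    ∀ (ns : List Int) (v : List Bool) (s : Int),
      dfsFold g f ns (v, s) = ((dfsFold g f ns (v, 0)).1, s + (dfsFold g f ns (v, 0)).2) := by
  intro ns
  induction ns with
  | nil => intro v s; simp [dfsFold]
  | cons n ns ihn =>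
    intro v s
    simp only [dfsFold, List.foldl_cons] at *
    rw [ihn (dfsA g f n v).1 (s + (dfsA g f n v).2), ihn (dfsA g f n v).1 (0 + (dfsA g f n v).2)]
    simp only [Prod.mk.injEq, true_and]
    omega

theorem no_false_of_count_zero {v : List Bool} {n : Int} (h0 : v.count false = 0) :
    PySem.List.pyGet? v n ≠ some false := by
  intro hc
  obtain ⟨j, hj, _⟩ := pyGet?_some_elim hc
  obtain ⟨hlt, hv⟩ := List.getElem?_eq_some_iff.mp hj
  have hmem : false ∈ v := hv ▸ List.getElem_mem hlt
  have := List.count_pos_iff.mpr hmem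
  omega

theorem dfsFold_cons (g : List (List Int)) (f : Nat) (n : Int) (ns : List Int)
    (st : List Bool × Int) :
    dfsFold g f (n :: ns) st =
      dfsFold g f ns ((dfsA g f n st.1).1, st.2 + (dfsA g f n st.1).2) := rfl

-- the fuel-0 fold is the identity (it is only reached with no unvisited node left)
theorem dfsFold_zero (g : List (List Int)) :
    ∀ (ns : List Int) (v : List Bool) (s : Int), dfsFold g 0 ns (v, s) = (v, s) := by
  intro ns
  induction ns with
  | nil => intro v s; simp [dfsFold]
  | cons n ns ihn =>
    intro v s
    simp only [dfsFold, List.foldl_cons, dfsA]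
    simpa [dfsFold] using ihn v s

-- the bisimulation: the explicit stack `ns ++ rest` runs A's neighbour fold on `ns`
theorem bisim (g : List (List Int)) :
    ∀ (f : Nat) (ns : List Int) (v : List Bool) (rest : List Int) (size : Int),
      v.count false ≤ f →
      stackLoopB g v (ns ++ rest) size =
        stackLoopB g (dfsFold g f ns (v, 0)).1 rest (size + (dfsFold g f ns (v, 0)).2) := by
  intro f
  induction f with
  | zero =>
    intro ns
    induction ns with
    | nil => intro v rest size h; simp [dfsFold]
    | cons n ns ihn =>
      intro v rest size h
      have h0 : v.count false = 0 := Nat.le_zero.mp h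
      rw [dfsFold_zero, List.cons_append, stackLoopB_cons]
      cases hc : PySem.List.pyGet? v n with
      | none =>
        dsimp only
        have hrec := ihn v rest size h
        rw [dfsFold_zero] at hrec
        simpa using hrec
      | some b =>
        cases b
        · exact absurd hc (no_false_of_count_zero h0)
        · dsimp only
          have hrec := ihn v rest size h
          rw [dfsFold_zero] at hrec
          simpa using hrec
  | succ f ihf =>
    intro ns
    induction ns with
    | nil => intro v rest size h; simp [dfsFold]
    | cons n ns ihn =>
      intro v rest size h
      rw [List.cons_append, stackLoopB_cons]
      cases hc : PySem.List.pyGet? v n with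
      | none =>
        have hA : dfsA g (f + 1) n v = (v, 0) := by rw [dfsA_succ, hc]
        have hfold : dfsFold g (f + 1) (n :: ns) (v, 0) = dfsFold g (f + 1) ns (v, 0) := by
          simp [dfsFold, List.foldl_cons, hA]
        dsimp only
        rw [hfold]
        exact ihn v rest size h
      | some b =>
        cases b
        · -- unvisited: mark, descend into the neighbours, then the siblings
          obtain ⟨hl, hcnt⟩ := mark_inv hc
          have hv1 : (PySem.List.pySetD v n true).count false ≤ f := by omega
          have step1 := ihf (PySem.List.pyGetD g n []) (PySem.List.pySetD v n true)
            (ns ++ rest) (size + 1) hv1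
          dsimp only
          rw [step1]
          set q := dfsFold g f (PySem.List.pyGetD g n []) (PySem.List.pySetD v n true, 0) with hq
          have hq1 : q.1.count false ≤ f + 1 := by
            have hf2 := (fold_inv g f (dfsA_inv g f) (PySem.List.pyGetD g n [])
              (PySem.List.pySetD v n true, 0)).2
            simp only at hf2
            rw [← hq] at hf2
            omega
          rw [ihn q.1 rest (size + 1 + q.2) hq1]
          have hA : dfsA g (f + 1) n v = (q.1, 1 + q.2) := by
            rw [dfsA_succ, hc]
            dsimp only
            rw [dfsFold_shift g f (PySem.List.pyGetD g n []) (PySem.List.pySetD v n true) 1, hq]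
          have hexp : dfsFold g (f + 1) (n :: ns) (v, 0) =
              dfsFold g (f + 1) ns (q.1, 1 + q.2) := by
            rw [dfsFold_cons, hA]
            norm_num
          rw [hexp, dfsFold_shift g (f + 1) ns q.1 (1 + q.2)]
          dsimp only
          congr 1
          omega
        · have hA : dfsA g (f + 1) n v = (v, 0) := by rw [dfsA_succ, hc]
          have hfold : dfsFold g (f + 1) (n :: ns) (v, 0) = dfsFold g (f + 1) ns (v, 0) := by
            simp [dfsFold, List.foldl_cons, hA]
          dsimp only
          rw [hfold]
          exact ihn v rest size h

-- the two outer-loop bodies agree on in-range nodes (and preserve the length of visited)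
theorem step_agree (g : List (List Int)) (v : List Bool) (comps : List (Int × Int))
    (node : Int) (hlen : v.length = g.length) (h0 : 0 ≤ node) (h1 : node < (g.length : Int)) :
    (match PySem.List.pyGet? v node with
      | some false =>
        let p := dfsA g g.length node v
        (p.1, if 3 ≤ p.2 then comps ++ [(node, p.2)] else comps)
      | _ => (v, comps)) =
    (if PySem.List.pyGet? v node == some true then (v, comps)
      else
        let p := stackLoopB g v [node] 0
        (p.1, if 3 ≤ p.2 then comps ++ [(node, p.2)] else comps)) := by
  have hvn : node < ((v.length : Int)) := by rw [hlen]; exact h1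
  have hin := PySem.List.pyGet?_eq_some_getElem (xs := v) (i := node) h0 hvn
  cases hbv : PySem.List.pyGet? v node with
  | none => rw [hbv] at hin; cases hin
  | some b =>
    cases b
    · -- unvisited: run the bisimulation with ns = [node]
      dsimp only
      have hcount : v.count false ≤ g.length := hlen ▸ List.count_le_length
      have hb := bisim g g.length [node] v [] 0 hcount
      simp only [List.append_nil] at hb
      rw [hb, stackLoopB_nil]
      have hfold : dfsFold g g.length [node] (v, 0) =
          ((dfsA g g.length node v).1, 0 + (dfsA g g.length node v).2) := by
        simp [dfsFold]
      rw [hfold]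
      simp
    · simp

-- ===== VERDICT (by name: the statement is the Claim_ definition above) =====
theorem devide_by_comps_spec : Claim_equal_devide_by_comps := by
  intro graph _ _
  unfold Spec_devide_by_comps devide_by_comps devide_by_comps_alt
  suffices h : ∀ (ns : List Int) (v : List Bool) (comps : List (Int × Int)),
      (∀ n ∈ ns, 0 ≤ n ∧ n < (graph.length : Int)) → v.length = graph.length →
      ns.foldl (fun (st : List Bool × List (Int × Int)) node =>
        match PySem.List.pyGet? st.1 node with
        | some false =>
          let p := dfsA graph graph.length node st.1
          (p.1, if 3 ≤ p.2 then st.2 ++ [(node, p.2)] else st.2)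
        | _ => st) (v, comps) =
      ns.foldl (fun (st : List Bool × List (Int × Int)) node =>
        if PySem.List.pyGet? st.1 node == some true then st
        else
          let p := stackLoopB graph st.1 [node] 0
          (p.1, if 3 ≤ p.2 then st.2 ++ [(node, p.2)] else st.2)) (v, comps) by
    rw [h _ _ _ (fun n hn => by
        have := (PySem.List.mem_pyRange_one).mp hn
        exact ⟨this.1, this.2⟩)
      (by simp)]
  intro ns
  induction ns with
  | nil => intro v comps _ _; rfl
  | cons n ns ihn =>
    intro v comps hmem hlen
    obtain ⟨h0, h1⟩ := hmem n (List.mem_cons_self ..)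
    have hstep := step_agree graph v comps n hlen h0 h1
    simp only [List.foldl_cons]
    rw [← hstep]
    have hpres : (match PySem.List.pyGet? v n with
        | some false =>
          let p := dfsA graph graph.length n v
          (p.1, if 3 ≤ p.2 then comps ++ [(n, p.2)] else comps)
        | _ => (v, comps)).1.length = graph.length := by
      cases hc : PySem.List.pyGet? v n with
      | none => simpa using hlen
      | some b => cases b
                  · simpa using ((dfsA_inv graph graph.length n v).1.trans hlen)
                  · simpa using hlen
    exact ihn _ _ (fun m hm => hmem m (List.mem_cons_of_mem _ hm)) hpres
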